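-- pv_equiv track=rewrite | github.com/vedant553/spell-casting-game-webapp | spell_duel.py | _is_zigzag
-- ===== SOURCE A (Python) =====
-- def _is_zigzag(points):
--     """
--     Check if the path has multiple sharp vertical direction changes.
--     A zigzag has at least 3-4 peaks/valleys.
--     """
--     if len(points) < 8:
--         return False
--
--     # Extract y-coordinates
--     y_coords = [p[1] for p in points]
--
--     # Find peaks and valleys (local extrema)
--     direction_changes = 0
--     for i in range(1, len(y_coords) - 1):
--         # Check if this is a local maximum or minimum
--         if (y_coords[i] > y_coords[i-1] and y_coords[i] > y_coords[i+1]) or \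
--            (y_coords[i] < y_coords[i-1] and y_coords[i] < y_coords[i+1]):
--             direction_changes += 1
--
--     # Zigzag should have at least 3 direction changes
--     return direction_changes >= 3
-- ===== SOURCE B (Python) =====
-- def _is_zigzag(points):
--     if len(points) < 8:
--         return False
--     ys = [p[1] for p in points]
--
--     def count(seg):
--         # number of strict local extrema at interior positions of seg,
--         # by divide and conquer on two halves overlapping in two elements
--         n = len(seg)
--         if n < 3:
--             return 0
--         if n == 3:
--             a, b, c = seg
--             return 1 if (b > a and b > c) or (b < a and b < c) else 0
--         m = n // 2
--         return count(seg[:m + 1]) + count(seg[m - 1:])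
--
--     return count(ys) >= 3
-- ===== Notes on version B (the rewrite author's own statement) =====
-- stated objective: alternative
-- what changed: Replaces the single indexed linear scan by a divide-and-conquer recursion: the extrema count of the y-sequence is computed as the sum of the counts of two halves that overlap in two elements, with a three-element base case.
import Mathlib
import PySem

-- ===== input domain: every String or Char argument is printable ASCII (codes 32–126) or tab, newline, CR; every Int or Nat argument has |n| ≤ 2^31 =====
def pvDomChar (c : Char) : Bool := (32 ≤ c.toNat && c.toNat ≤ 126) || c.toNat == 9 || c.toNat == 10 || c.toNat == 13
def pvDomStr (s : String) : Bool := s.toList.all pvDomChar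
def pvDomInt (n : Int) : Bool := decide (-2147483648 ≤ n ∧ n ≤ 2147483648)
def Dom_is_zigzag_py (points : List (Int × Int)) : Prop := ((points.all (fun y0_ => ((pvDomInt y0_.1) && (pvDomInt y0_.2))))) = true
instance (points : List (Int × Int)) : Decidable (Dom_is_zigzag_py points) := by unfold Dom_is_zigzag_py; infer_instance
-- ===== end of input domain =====

-- B computes the extrema count by divide and conquer on overlapping halves instead of a
-- single indexed linear scan (alternative algorithm, same result).


-- ===== PORT A =====
def is_zigzag_py (points : List (Int × Int)) : Bool :=
  if points.length < 8 then false
  else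
    let y_coords : List Int := points.map (fun p => p.2)
    let direction_changes : Int :=
      (PySem.List.pyRange 1 ((y_coords.length : Int) - 1) 1).foldl
        (fun acc i =>
          if (PySem.List.pyGetD y_coords i 0 > PySem.List.pyGetD y_coords (i-1) 0 ∧
              PySem.List.pyGetD y_coords i 0 > PySem.List.pyGetD y_coords (i+1) 0) ∨
             (PySem.List.pyGetD y_coords i 0 < PySem.List.pyGetD y_coords (i-1) 0 ∧
              PySem.List.pyGetD y_coords i 0 < PySem.List.pyGetD y_coords (i+1) 0)
          then acc + 1 else acc) (0 : Int)
    decide (direction_changes ≥ 3)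

-- ===== PORT B =====
-- helper 'count' of Source B: extrema of seg, divide and conquer on halves overlapping in two elements
-- the n == 3 base case of Source B's 'count' ('a, b, c = seg')
def zzBase : List Int → Int
  | a :: b :: c :: _ => if (b > a ∧ b > c) ∨ (b < a ∧ b < c) then 1 else 0
  | _ => 0

def zzCount (seg : List Int) : Int :=
  if seg.length < 3 then 0
  else if seg.length = 3 then zzBase seg
  else
    -- m = n // 2 (lengths are nonnegative, so Nat division matches Python's //)
    zzCount (PySem.List.slice seg none (some ((seg.length / 2 : Nat) + 1 : Int))) +
    zzCount (PySem.List.slice seg (some ((seg.length / 2 : Nat) - 1 : Int)) none)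
termination_by seg.length
decreasing_by
  · rename_i h1 h2
    rw [PySem.List.slice_to (hb := by omega)]
    simp only [List.length_take]
    omega
  · rename_i h1 h2
    rw [PySem.List.slice_from (ha := by omega)]
    simp only [List.length_drop]
    omega

def is_zigzag_py_alt (points : List (Int × Int)) : Bool :=
  if points.length < 8 then false
  else
    let ys : List Int := points.map (fun p => p.2)
    decide (zzCount ys ≥ 3)

-- ===== PRECONDITION & SPEC =====
def Spec_is_zigzag_py (points : List (Int × Int)) (out : Bool) : Prop := out = is_zigzag_py_alt points
instance (points : List (Int × Int)) (out : Bool) : Decidable (Spec_is_zigzag_py points out) := by unfold Spec_is_zigzag_py; infer_instance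

-- ===== CLAIM =====
def Claim_equal_is_zigzag_py : Prop := ∀ (points : List (Int × Int)), Dom_is_zigzag_py points → Spec_is_zigzag_py points (is_zigzag_py points)

-- ===== LEMMAS AND PROOFS =====

-- the extremum test as a Bool predicate on a window
def extP (a b c : Int) : Bool := decide ((b > a ∧ b > c) ∨ (b < a ∧ b < c))

-- the reference count: extP over all interior windows, as countP over the index range
def cntRef (seg : List Int) : Nat :=
  (List.range (seg.length - 2)).countP
    (fun k => extP (seg.getD k 0) (seg.getD (k+1) 0) (seg.getD (k+2) 0))

-- getD through take / drop
theorem getD_take_eq (l : List Int) (n j : Nat) (hj : j < n) (hn : n ≤ l.length) :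
    (l.take n).getD j 0 = l.getD j 0 := by
  rw [List.getD_eq_getElem _ _ (by simp; omega), List.getD_eq_getElem _ _ (by omega)]
  simp [List.getElem_take]

theorem getD_drop_eq (l : List Int) (n j : Nat) :
    (l.drop n).getD j 0 = l.getD (n + j) 0 := by
  simp [List.getD_eq_getElem?_getD, List.getElem?_drop]

-- the reference count splits at any cut with a two-element overlap
theorem cntRef_split (seg : List Int) (m : Nat) (h2 : 2 ≤ m) (hm : m + 1 ≤ seg.length) :
    cntRef (seg.take (m+1)) + cntRef (seg.drop (m-1)) = cntRef seg := by
  unfold cntRef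
  rw [List.length_take, List.length_drop]
  have ha : min (m+1) seg.length - 2 = m - 1 := by omega
  have hsplit : seg.length - 2 = (m-1) + (seg.length - (m-1) - 2) := by omega
  rw [ha, hsplit, List.range_add, List.countP_append, List.countP_map]
  congr 1
  · refine List.countP_congr ?_
    intro k hk
    have hk' : k < m - 1 := List.mem_range.mp hk
    rw [getD_take_eq _ _ _ (by omega) hm, getD_take_eq _ _ _ (by omega) hm,
        getD_take_eq _ _ _ (by omega) hm]
  · refine List.countP_congr ?_
    intro k _
    simp only [Function.comp_def, getD_drop_eq]
    have e1 : m - 1 + k + 1 = m - 1 + (k + 1) := by omega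
    have e2 : m - 1 + k + 2 = m - 1 + (k + 2) := by omega
    rw [e1, e2]

theorem zzCount_eq_cntRef (seg : List Int) : zzCount seg = (cntRef seg : Int) := by
  generalize hn : seg.length = n
  induction n using Nat.strong_induction_on generalizing seg with
  | _ n ih =>
  rw [zzCount]
  by_cases h1 : seg.length < 3
  · rw [if_pos h1]
    have hz : seg.length - 2 = 0 := by omega
    simp [cntRef, hz]
  · rw [if_neg h1]
    by_cases h2 : seg.length = 3
    · rw [if_pos h2]
      obtain ⟨a, b, c, rfl⟩ := List.length_eq_three.mp h2
      by_cases h : (b > a ∧ b > c) ∨ (b < a ∧ b < c)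
      · simp [zzBase, cntRef, List.range_succ, extP, h]
      · simp [zzBase, cntRef, List.range_succ, extP, h]
    · rw [if_neg h2]
      have h4 : 4 ≤ seg.length := by omega
      have hm2 : 2 ≤ seg.length / 2 := by omega
      have hm1 : seg.length / 2 + 1 ≤ seg.length := by omega
      rw [PySem.List.slice_to (hb := by omega), PySem.List.slice_from (ha := by omega)]
      have e1 : (((seg.length / 2 : Nat) : Int) + 1).toNat = seg.length / 2 + 1 := by omega
      have e2 : (((seg.length / 2 : Nat) : Int) - 1).toNat = seg.length / 2 - 1 := by omega
      rw [e1, e2]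
      rw [ih (seg.take (seg.length / 2 + 1)).length (by simp; omega) _ rfl,
          ih (seg.drop (seg.length / 2 - 1)).length (by simp; omega) _ rfl]
      rw [← cntRef_split seg (seg.length / 2) hm2 hm1]
      push_cast
      ring

theorem a_count_eq_cntRef (y : List Int) :
    (PySem.List.pyRange 1 ((y.length : Int) - 1) 1).foldl
        (fun acc i =>
          if (PySem.List.pyGetD y i 0 > PySem.List.pyGetD y (i-1) 0 ∧
              PySem.List.pyGetD y i 0 > PySem.List.pyGetD y (i+1) 0) ∨
             (PySem.List.pyGetD y i 0 < PySem.List.pyGetD y (i-1) 0 ∧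
              PySem.List.pyGetD y i 0 < PySem.List.pyGetD y (i+1) 0)
          then acc + 1 else acc) (0 : Int) = (cntRef y : Int) := by
  rw [PySem.List.foldl_ite_add_one]
  rw [PySem.List.pyRange_one, List.countP_map, zero_add]
  unfold cntRef
  have hcast : (((y.length : Int) - 1) - 1).toNat = y.length - 2 := by omega
  rw [hcast]
  refine congrArg Nat.cast (List.countP_congr ?_)
  intro k hk
  have hk' : k < y.length - 2 := List.mem_range.mp hk
  have e1 : (1 : Int) + (k : Nat) = ((k + 1 : Nat) : Int) := by push_cast; ring
  have e2 : ((k + 1 : Nat) : Int) - 1 = ((k : Nat) : Int) := by push_cast; ring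
  have e3 : ((k + 1 : Nat) : Int) + 1 = ((k + 2 : Nat) : Int) := by push_cast; ring
  simp only [Function.comp_def, e1, e2, e3, PySem.List.pyGetD_natCast, extP]

-- ===== VERDICT =====
theorem is_zigzag_py_spec : Claim_equal_is_zigzag_py := by
  unfold Claim_equal_is_zigzag_py Spec_is_zigzag_py
  intro points _
  by_cases h8 : points.length < 8
  · simp [is_zigzag_py, is_zigzag_py_alt, h8]
  · unfold is_zigzag_py is_zigzag_py_alt
    simp only [if_neg h8]
    rw [a_count_eq_cntRef, zzCount_eq_cntRef]
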